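-- pv_equiv track=rewrite | github.com/undercurrentai/AIPEA | src/aipea/search.py | _escape_plaintext
-- ===== SOURCE A (Python) =====
-- def _escape_plaintext(text: str) -> str:
--     """Escape plaintext-significant patterns in user-supplied text.
--
--     Prevents injected content from creating spurious numbered-list items
--     in the generic (plaintext) formatter — checks every line, not just the first.
--     """
--     lines = text.split("\n")
--     escaped = []
--     for line in lines:
--         is_list_item = (
--             line
--             and len(line) >= 2
--             and line[0].isdigit()
--             and line.lstrip("0123456789").startswith(".")
--         )
--         if is_list_item:
--             line = "\\" + line
--         escaped.append(line)
--     return "\n".join(escaped)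
-- ===== SOURCE B (Python) =====
-- def _escape_plaintext(text: str) -> str:
--     # Single pass over the characters with a line-start flag; no line list is built.
--     out = []
--     at_start = True
--     n = len(text)
--     i = 0
--     while i < n:
--         c = text[i]
--         if at_start and "0" <= c <= "9":
--             j = i + 1
--             while j < n and "0" <= text[j] <= "9":
--                 j += 1
--             if j < n and text[j] == ".":
--                 out.append("\\")
--         out.append(c)
--         at_start = c == "\n"
--         i += 1
--     return "".join(out)
-- ===== Notes on version B (the rewrite author's own statement) =====
-- stated objective: alternative
-- what changed: Replaces A's split-into-lines / per-line test / join pipeline by a single character-level pass that carries a line-start flag and does a digits-then-dot lookahead at each line start, building the output without ever materialising a list of lines.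
import Mathlib
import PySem

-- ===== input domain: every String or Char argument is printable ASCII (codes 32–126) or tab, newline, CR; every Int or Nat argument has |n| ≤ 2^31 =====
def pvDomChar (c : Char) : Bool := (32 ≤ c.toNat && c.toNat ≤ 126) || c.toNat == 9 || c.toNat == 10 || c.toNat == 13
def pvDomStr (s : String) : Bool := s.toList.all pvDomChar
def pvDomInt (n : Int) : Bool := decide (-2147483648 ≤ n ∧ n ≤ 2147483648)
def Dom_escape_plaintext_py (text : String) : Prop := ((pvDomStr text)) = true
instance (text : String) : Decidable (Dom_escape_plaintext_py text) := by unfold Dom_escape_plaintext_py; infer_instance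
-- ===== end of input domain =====

-- B replaces A's split-into-lines / per-line test / join pipeline by one character pass with a
-- line-start flag (objective: alternative; same cost, no intermediate line list).

-- ===== PORT A =====

-- the "0123456789" literal of A's lstrip call
def pvDigits : List Char := ['0','1','2','3','4','5','6','7','8','9']

-- s.lstrip(chars): drop leading characters contained in chars (hand port, exact for str.lstrip(chars))
def pyLstripChars (cs chars : List Char) : List Char := cs.dropWhile (fun c => chars.contains c)

def escape_plaintext_py (text : String) : String :=
  let lines := PySem.Chars.splitOn text.toList ['\n']
  let escaped : List (List Char) := lines.foldl (fun acc line =>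
    let is_list_item :=
      (!line.isEmpty) &&
      decide (2 ≤ PySem.Chars.len line) &&
      (match PySem.List.pyGet? line 0 with
       | some c => PySem.Chars.isdigit c
       | none => false) &&
      PySem.Chars.startswith (pyLstripChars line pvDigits) ['.']
    acc ++ [if is_list_item then '\\' :: line else line]) []
  String.mk (PySem.Chars.join ['\n'] escaped)

-- ===== PORT B =====

-- B's inner while loop: skip ASCII digits after the current position, then test for '.'
def dotAfterDigits : List Char → Bool
  | [] => false
  | c :: rest => if ('0' ≤ c && c ≤ '9') then dotAfterDigits rest else c == '.'

-- B's outer while loop: one pass, carrying the at_start flag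
def escBGo : Bool → List Char → List Char
  | _, [] => []
  | atStart, c :: rest =>
    (if atStart && ('0' ≤ c && c ≤ '9') && dotAfterDigits rest then ['\\', c] else [c])
      ++ escBGo (c == '\n') rest

def escape_plaintext_py_alt (text : String) : String :=
  String.mk (escBGo true text.toList)

-- ===== PRECONDITION & SPEC =====
def Spec_escape_plaintext_py (text : String) (out : String) : Prop := out = escape_plaintext_py_alt text
instance (text : String) (out : String) : Decidable (Spec_escape_plaintext_py text out) := by unfold Spec_escape_plaintext_py; infer_instance

-- ===== CLAIM (what is proved, stated in full; the proofs are below) =====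
def Claim_equal_escape_plaintext_py : Prop := ∀ (text : String), Dom_escape_plaintext_py text → Spec_escape_plaintext_py text (escape_plaintext_py text)

-- ===== LEMMAS AND PROOFS =====

-- the per-line decision of B
def escLineB : List Char → List Char
  | [] => []
  | c :: r => if ('0' ≤ c && c ≤ '9') && dotAfterDigits r then '\\' :: c :: r else c :: r

-- reference newline split
def splitNlAux (pre : List Char) : List Char → List (List Char)
  | [] => [pre]
  | c :: rest => if c = '\n' then pre :: splitNlAux [] rest else splitNlAux (pre ++ [c]) rest

theorem foldl_append_map {α β : Type} (f : α → β) :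
    ∀ (l : List α) (acc : List β), l.foldl (fun a x => a ++ [f x]) acc = acc ++ l.map f := by
  intro l
  induction l with
  | nil => simp
  | cons x t ih => intro acc; simp only [List.foldl_cons, ih, List.map_cons]; simp

theorem char_eq_iff_toNat (c d : Char) : (c = d) ↔ c.toNat = d.toNat := by
  constructor
  · intro h; rw [h]
  · intro h; exact Char.ext (UInt32.toNat_inj.mp h)

theorem char_le_iff_toNat (c d : Char) : (c ≤ d) ↔ c.toNat ≤ d.toNat := by
  rw [Char.le_def, UInt32.le_iff_toNat_le]; rfl

theorem digits_contains (c : Char) : pvDigits.contains c = ('0' ≤ c && c ≤ '9') := by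
  have hmem : c ∈ pvDigits ↔ (48 ≤ c.toNat ∧ c.toNat ≤ 57) := by
    simp only [pvDigits, List.mem_cons, List.not_mem_nil, or_false, char_eq_iff_toNat,
      show ('0':Char).toNat = 48 from rfl, show ('1':Char).toNat = 49 from rfl,
      show ('2':Char).toNat = 50 from rfl, show ('3':Char).toNat = 51 from rfl,
      show ('4':Char).toNat = 52 from rfl, show ('5':Char).toNat = 53 from rfl,
      show ('6':Char).toNat = 54 from rfl, show ('7':Char).toNat = 55 from rfl,
      show ('8':Char).toNat = 56 from rfl, show ('9':Char).toNat = 57 from rfl]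
    omega
  by_cases h : (48 ≤ c.toNat ∧ c.toNat ≤ 57)
  · have h1 : pvDigits.contains c = true := by
      rw [List.contains_eq_mem]; exact decide_eq_true (hmem.mpr h)
    have h2 : ('0' ≤ c && c ≤ '9') = true := by
      simp only [Bool.and_eq_true, decide_eq_true_eq, char_le_iff_toNat,
        show ('0':Char).toNat = 48 from rfl, show ('9':Char).toNat = 57 from rfl]
      omega
    rw [h1, h2]
  · have h1 : pvDigits.contains c = false := by
      rw [List.contains_eq_mem]; exact decide_eq_false (fun hc => h (hmem.mp hc))
    have h2 : ('0' ≤ c && c ≤ '9') = false := by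
      simp only [Bool.and_eq_false_iff, decide_eq_false_iff_not, char_le_iff_toNat,
        show ('0':Char).toNat = 48 from rfl, show ('9':Char).toNat = 57 from rfl]
      omega
    rw [h1, h2]

theorem go_spec : ∀ (fuel : Nat) (l cur : List Char) (acc : List (List Char)), l.length < fuel →
    PySem.Chars.splitOn.go ['\n'] fuel l cur acc = acc.reverse ++ splitNlAux cur.reverse l := by
  intro fuel
  induction fuel with
  | zero => intro l cur acc h; omega
  | succ n ih =>
    intro l cur acc h
    cases l with
    | nil => rw [PySem.Chars.splitOn.go.eq_def]; simp [splitNlAux]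
    | cons c rest =>
      rw [PySem.Chars.splitOn.go.eq_def]
      simp only [List.length_cons] at h
      by_cases hc : c = '\n'
      · subst hc
        have hp : List.isPrefixOf ['\n'] ('\n' :: rest) = true := by simp [List.isPrefixOf]
        simp only [hp, if_true]
        rw [show (List.drop ['\n'].length ('\n' :: rest)) = rest from rfl, ih _ _ _ (by omega)]
        simp [splitNlAux]
      · have hp : List.isPrefixOf ['\n'] (c :: rest) = false := by
          simp [List.isPrefixOf]; exact fun h => hc h.symm
        simp only [hp, Bool.false_eq_true, if_false]
        rw [ih _ _ _ (by omega)]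
        simp [splitNlAux, hc]

theorem splitOn_eq (s : List Char) : PySem.Chars.splitOn s ['\n'] = splitNlAux [] s := by
  rw [PySem.Chars.splitOn, go_spec _ _ _ _ (by omega)]
  simp

theorem dropWhile_digits_dot (r : List Char) :
    PySem.Chars.startswith (r.dropWhile (fun c => ('0' ≤ c && c ≤ '9'))) ['.'] = dotAfterDigits r := by
  induction r with
  | nil => simp [PySem.Chars.startswith, dotAfterDigits, List.isPrefixOf]
  | cons c rest ih =>
    rw [List.dropWhile_cons, show dotAfterDigits (c :: rest) =
        (if ('0' ≤ c && c ≤ '9') = true then dotAfterDigits rest else c == '.') from rfl]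
    by_cases h : ('0' ≤ c && c ≤ '9') = true
    · rw [if_pos h, if_pos h, ih]
    · rw [if_neg h, if_neg h]
      simp [PySem.Chars.startswith, List.isPrefixOf, eq_comm]

theorem escLineA_eq (line : List Char) :
    (if (!line.isEmpty) &&
        decide (2 ≤ PySem.Chars.len line) &&
        (match PySem.List.pyGet? line 0 with
         | some c => PySem.Chars.isdigit c
         | none => false) &&
        PySem.Chars.startswith (pyLstripChars line pvDigits) ['.']
     then '\\' :: line else line) = escLineB line := by
  cases line with
  | nil => simp [escLineB]
  | cons c r =>
    have hget : PySem.List.pyGet? (c :: r) (0:Int) = some c := by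
      simp [PySem.List.pyGet?, PySem.List.pyIdx?]
    rw [hget, show (match some c with | some c => PySem.Chars.isdigit c | none => false) = PySem.Chars.isdigit c from rfl]
    have hdig : PySem.Chars.isdigit c = ('0' ≤ c && c ≤ '9') := by
      simp [PySem.Chars.isdigit]
    rw [hdig]
    simp only [escLineB, pyLstripChars, List.dropWhile_cons, digits_contains]
    by_cases hc : ('0' ≤ c && c ≤ '9') = true
    · simp only [hc, if_true, dropWhile_digits_dot]
      cases r with
      | nil => simp [PySem.Chars.len, dotAfterDigits]
      | cons d r' =>
        by_cases hd : dotAfterDigits (d :: r') = true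
        · simp only [hd]
          have h2 : decide (2 ≤ PySem.Chars.len (c :: d :: r')) = true := by
            simp [PySem.Chars.len]; omega
          simp [h2]
        · simp only [Bool.not_eq_true] at hd
          simp [hd]
    · simp only [Bool.not_eq_true] at hc
      simp [hc, PySem.Chars.startswith, List.isPrefixOf]

theorem escBGo_false_no_nl : ∀ (l : List Char), '\n' ∉ l → escBGo false l = l := by
  intro l
  induction l with
  | nil => intro _; rfl
  | cons c rest ih =>
    intro h
    simp only [List.mem_cons, not_or] at h
    have hc : (c == '\n') = false := by simp; exact fun e => h.1 e.symm
    simp [escBGo, hc, ih h.2]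

theorem escBGo_false_append : ∀ (line : List Char), '\n' ∉ line → ∀ rest,
    escBGo false (line ++ '\n' :: rest) = line ++ '\n' :: escBGo true rest := by
  intro line
  induction line with
  | nil => intro _ rest; simp [escBGo]
  | cons c r ih =>
    intro h rest
    simp only [List.mem_cons, not_or] at h
    have hc : (c == '\n') = false := by simp; exact fun e => h.1 e.symm
    simp [escBGo, hc, ih h.2]

theorem dotAfter_append : ∀ (r : List Char), '\n' ∉ r → ∀ rest,
    dotAfterDigits (r ++ '\n' :: rest) = dotAfterDigits r := by
  intro r
  induction r with
  | nil => intro _ rest; simp [dotAfterDigits]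
  | cons c t ih =>
    intro h rest
    simp only [List.mem_cons, not_or] at h
    by_cases hc : ('0' ≤ c && c ≤ '9') = true
    · simp [dotAfterDigits, hc, ih h.2]
    · simp only [Bool.not_eq_true] at hc
      simp [dotAfterDigits, hc]

theorem escBGo_true_no_nl (l : List Char) (h : '\n' ∉ l) : escBGo true l = escLineB l := by
  cases l with
  | nil => rfl
  | cons c r =>
    simp only [List.mem_cons, not_or] at h
    have hc : (c == '\n') = false := by simp; exact fun e => h.1 e.symm
    by_cases hd : (('0' ≤ c && c ≤ '9') && dotAfterDigits r) = true
    · simp [escBGo, escLineB, hd, hc, escBGo_false_no_nl r h.2]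
    · simp only [Bool.not_eq_true] at hd
      simp [escBGo, escLineB, hd, hc, escBGo_false_no_nl r h.2]

theorem escBGo_true_append (line rest : List Char) (h : '\n' ∉ line) :
    escBGo true (line ++ '\n' :: rest) = escLineB line ++ '\n' :: escBGo true rest := by
  cases line with
  | nil => simp [escBGo, escLineB]
  | cons c r =>
    simp only [List.mem_cons, not_or] at h
    have hc : (c == '\n') = false := by simp; exact fun e => h.1 e.symm
    rw [List.cons_append]
    by_cases hd : (('0' ≤ c && c ≤ '9') && dotAfterDigits r) = true
    · simp [escBGo, escLineB, dotAfter_append r h.2, hd, hc, escBGo_false_append r h.2]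
    · simp only [Bool.not_eq_true] at hd
      simp [escBGo, escLineB, dotAfter_append r h.2, hd, hc, escBGo_false_append r h.2]

theorem splitNlAux_ne_nil : ∀ (l pre : List Char), splitNlAux pre l ≠ [] := by
  intro l
  induction l with
  | nil => intro pre; simp [splitNlAux]
  | cons c rest ih =>
    intro pre
    by_cases h : c = '\n' <;> simp [splitNlAux, h, ih]

theorem aux_no_nl : ∀ (l : List Char), '\n' ∉ l → ∀ pre, splitNlAux pre l = [pre ++ l] := by
  intro l
  induction l with
  | nil => intro _ pre; simp [splitNlAux]
  | cons c rest ih =>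
    intro h pre
    simp only [List.mem_cons, not_or] at h
    have hc : ¬ (c = '\n') := fun e => h.1 e.symm
    simp [splitNlAux, hc, ih h.2]

theorem aux_append : ∀ (line : List Char), '\n' ∉ line → ∀ pre rest,
    splitNlAux pre (line ++ '\n' :: rest) = (pre ++ line) :: splitNlAux [] rest := by
  intro line
  induction line with
  | nil => intro _ pre rest; simp [splitNlAux]
  | cons c r ih =>
    intro h pre rest
    simp only [List.mem_cons, not_or] at h
    have hc : ¬ (c = '\n') := fun e => h.1 e.symm
    simp [splitNlAux, hc, ih h.2]

theorem join_cons (a : List Char) (ps : List (List Char)) (h : ps ≠ []) :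
    PySem.Chars.join ['\n'] (a :: ps) = a ++ '\n' :: PySem.Chars.join ['\n'] ps := by
  cases ps with
  | nil => exact absurd rfl h
  | cons b t => simp [PySem.Chars.join, List.intercalate, List.intersperse]

theorem join_single (a : List Char) : PySem.Chars.join ['\n'] [a] = a := by
  simp [PySem.Chars.join, List.intercalate]

theorem exists_split : ∀ (s : List Char), '\n' ∈ s →
    ∃ line rest, '\n' ∉ line ∧ s = line ++ '\n' :: rest := by
  intro s
  induction s with
  | nil => intro h; exact absurd h (List.not_mem_nil)
  | cons c t ih =>
    intro h
    by_cases hc : c = '\n'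
    · exact ⟨[], t, by simp, by simp [hc]⟩
    · have ht : '\n' ∈ t := by
        rcases List.mem_cons.mp h with h1 | h1
        · exact absurd h1.symm hc
        · exact h1
      obtain ⟨line, rest, hnl, heq⟩ := ih ht
      exact ⟨c :: line, rest, by simp [hnl]; exact fun e => hc e.symm, by simp [heq]⟩

theorem main_eq : ∀ (n : Nat) (s : List Char), s.length ≤ n →
    PySem.Chars.join ['\n'] ((splitNlAux [] s).map escLineB) = escBGo true s := by
  intro n
  induction n with
  | zero =>
    intro s h
    have hs : s = [] := List.eq_nil_of_length_eq_zero (Nat.le_zero.mp h)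
    subst hs
    simp [splitNlAux, escLineB, escBGo, join_single]
  | succ n ih =>
    intro s hlen
    by_cases hmem : '\n' ∈ s
    · obtain ⟨line, rest, hnl, heq⟩ := exists_split s hmem
      subst heq
      rw [aux_append line hnl [] rest, List.nil_append, List.map_cons]
      rw [join_cons _ _ (by
        intro hnil
        exact splitNlAux_ne_nil rest [] (List.map_eq_nil_iff.mp hnil))]
      rw [escBGo_true_append line rest hnl]
      have hr : rest.length ≤ n := by
        simp only [List.length_append, List.length_cons] at hlen
        omega
      rw [ih rest hr]
    · rw [aux_no_nl s hmem [], List.nil_append, List.map_cons, List.map_nil]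
      rw [join_single, escBGo_true_no_nl s hmem]

-- ===== VERDICT (by name: the statement is the Claim_ definition above) =====
theorem escape_plaintext_py_spec : Claim_equal_escape_plaintext_py := by
  intro text _
  show escape_plaintext_py text = escape_plaintext_py_alt text
  simp only [escape_plaintext_py, escape_plaintext_py_alt]
  rw [foldl_append_map, List.nil_append, splitOn_eq]
  rw [List.map_congr_left (fun line _ => escLineA_eq line)]
  rw [main_eq text.toList.length text.toList (le_refl _)]
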